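-- pv_equiv track=rewrite | github.com/Edmond-Yang/Cryptology_QR-code | method.py | get_large_enough_prime
-- ===== SOURCE A (Python) =====
-- def get_large_enough_prime(batch):
--     standard_primes = [
--         5, 13, 127, 617, 997, 8191, 131071, 524287, 2147483647, 2305843009213693951,
--         618970019642690137449562111, 162259276829213363391578010288127,
--         170141183460469231731687303715884105727,
--         115792089237316195423570985008687907853269984665640564039457584007913129640233,
--         2135987035920910082395021706169552114602704522356652769947041607822219725780640550022962086936603,
--         39402006196394479212279040100143613805079739270465446667948293404245721771497210611414266254884915640806627990307047,
--         6864797660130609714981900799081393217269435300143305409394463459185543183397656052122559640661454554977296311391480858037121987999716643812574028291115057151,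
--         531137992816767098689588206552468627329593117727031923199444138200403559860852242739162502265229285668889329486246501015346579337652707239409519978766587351943831270835393219031728127,
--         10407932194664399081925240327364085538615262247266704805319112350403608059673360298012239441732324184842421613954281007791383566248323464908139906605677320762924129509389220345773183349661583550472959420547689811211693677147548478866962501384438260291732348885311160828538416585028255604666224831890918801847068222203140521026698435488732958028878050869736186900714720710555703168729087
--     ]
--     for prime in standard_primes:
--         if not [i for i in batch if i >= prime]:
--             return prime
--     return None
-- ===== SOURCE B (Python) =====
-- _STANDARD_PRIMES = [
--     5, 13, 127, 617, 997, 8191, 131071, 524287, 2147483647, 2305843009213693951,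
--     618970019642690137449562111, 162259276829213363391578010288127,
--     170141183460469231731687303715884105727,
--     115792089237316195423570985008687907853269984665640564039457584007913129640233,
--     2135987035920910082395021706169552114602704522356652769947041607822219725780640550022962086936603,
--     39402006196394479212279040100143613805079739270465446667948293404245721771497210611414266254884915640806627990307047,
--     6864797660130609714981900799081393217269435300143305409394463459185543183397656052122559640661454554977296311391480858037121987999716643812574028291115057151,
--     531137992816767098689588206552468627329593117727031923199444138200403559860852242739162502265229285668889329486246501015346579337652707239409519978766587351943831270835393219031728127,
--     10407932194664399081925240327364085538615262247266704805319112350403608059673360298012239441732324184842421613954281007791383566248323464908139906605677320762924129509389220345773183349661583550472959420547689811211693677147548478866962501384438260291732348885311160828538416585028255604666224831890918801847068222203140521026698435488732958028878050869736186900714720710555703168729087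
-- ]
--
-- def get_large_enough_prime(batch):
--     if not batch:
--         return _STANDARD_PRIMES[0]
--     m = max(batch)
--     for p in _STANDARD_PRIMES:
--         if p > m:
--             return p
--     return None
-- ===== Notes on version B (the rewrite author's own statement) =====
-- stated objective: faster
-- what changed: A filters the whole batch once per listed prime (building a throwaway list each time); B computes max(batch) in one pass and then returns the first listed prime exceeding it, so the batch is traversed exactly once.
import Mathlib
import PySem

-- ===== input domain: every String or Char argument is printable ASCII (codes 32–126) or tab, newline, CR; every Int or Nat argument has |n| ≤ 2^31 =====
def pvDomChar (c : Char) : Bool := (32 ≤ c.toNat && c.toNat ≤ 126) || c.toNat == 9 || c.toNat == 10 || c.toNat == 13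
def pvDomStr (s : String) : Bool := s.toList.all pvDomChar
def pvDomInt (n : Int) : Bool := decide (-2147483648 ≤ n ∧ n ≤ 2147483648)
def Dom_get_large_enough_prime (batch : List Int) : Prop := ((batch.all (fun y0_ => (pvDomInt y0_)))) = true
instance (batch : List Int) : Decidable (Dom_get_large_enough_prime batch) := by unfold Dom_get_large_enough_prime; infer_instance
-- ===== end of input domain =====

-- B computes max(batch) once and scans the prime list, instead of filtering the batch per prime; objective: faster (one batch pass).


def standardPrimes : List Int := [
  5, 13, 127, 617, 997, 8191, 131071, 524287, 2147483647, 2305843009213693951,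
  618970019642690137449562111, 162259276829213363391578010288127,
  170141183460469231731687303715884105727,
  115792089237316195423570985008687907853269984665640564039457584007913129640233,
  2135987035920910082395021706169552114602704522356652769947041607822219725780640550022962086936603,
  39402006196394479212279040100143613805079739270465446667948293404245721771497210611414266254884915640806627990307047,
  6864797660130609714981900799081393217269435300143305409394463459185543183397656052122559640661454554977296311391480858037121987999716643812574028291115057151,
  531137992816767098689588206552468627329593117727031923199444138200403559860852242739162502265229285668889329486246501015346579337652707239409519978766587351943831270835393219031728127,
  10407932194664399081925240327364085538615262247266704805319112350403608059673360298012239441732324184842421613954281007791383566248323464908139906605677320762924129509389220345773183349661583550472959420547689811211693677147548478866962501384438260291732348885311160828538416585028255604666224831890918801847068222203140521026698435488732958028878050869736186900714720710555703168729087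
]

-- ===== PORT A =====
-- A: for each prime in order, build [i for i in batch if i >= prime]; if empty, return that prime.
def goA (batch : List Int) : List Int → Option Int
  | [] => none
  | p :: ps => if batch.filter (fun i => decide (i ≥ p)) = [] then some p else goA batch ps

def get_large_enough_prime (batch : List Int) : Option Int :=
  goA batch standardPrimes

-- ===== PORT B =====
-- B: empty batch → first prime; else m = max(batch), return first prime > m.
def goB (m : Int) : List Int → Option Int
  | [] => none
  | p :: ps => if p > m then some p else goB m ps

def get_large_enough_prime_alt (batch : List Int) : Option Int :=
  match batch with
  | [] => standardPrimes.head?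
  | x :: xs => goB (xs.foldl max x) standardPrimes

-- ===== PRECONDITION & SPEC =====
def Spec_get_large_enough_prime (batch : List Int) (out : Option Int) : Prop := out = get_large_enough_prime_alt batch
instance (batch : List Int) (out : Option Int) : Decidable (Spec_get_large_enough_prime batch out) := by unfold Spec_get_large_enough_prime; infer_instance

-- ===== CLAIM (what is proved, stated in full; the proofs are below) =====
def Claim_equal_get_large_enough_prime : Prop := ∀ (batch : List Int), Dom_get_large_enough_prime batch → Spec_get_large_enough_prime batch (get_large_enough_prime batch)

-- ===== LEMMAS AND PROOFS =====

theorem foldl_max_lt (p x : Int) (xs : List Int) :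
    xs.foldl max x < p ↔ x < p ∧ ∀ a ∈ xs, a < p := by
  induction xs generalizing x with
  | nil => simp
  | cons a as ih =>
    simp only [List.foldl_cons, ih, max_lt_iff, List.mem_cons]
    constructor
    · rintro ⟨⟨hx, ha⟩, h⟩
      exact ⟨hx, fun b hb => hb.elim (fun e => e ▸ ha) (h b)⟩
    · rintro ⟨hx, h⟩
      exact ⟨⟨hx, h a (Or.inl rfl)⟩, fun b hb => h b (Or.inr hb)⟩

theorem filter_ge_eq_nil_iff (p x : Int) (xs : List Int) :
    (x :: xs).filter (fun i => decide (i ≥ p)) = [] ↔ xs.foldl max x < p := by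
  rw [List.filter_eq_nil_iff, foldl_max_lt]
  simp only [List.mem_cons, decide_eq_true_eq, ge_iff_le, not_le]
  constructor
  · intro h
    exact ⟨h x (Or.inl rfl), fun a ha => h a (Or.inr ha)⟩
  · rintro ⟨hx, h⟩ a ha
    exact ha.elim (fun e => e ▸ hx) (h a)

theorem goA_cons_eq_goB (x : Int) (xs : List Int) (primes : List Int) :
    goA (x :: xs) primes = goB (xs.foldl max x) primes := by
  induction primes with
  | nil => rfl
  | cons p ps ih =>
    simp only [goA, goB, filter_ge_eq_nil_iff, gt_iff_lt, ih]

-- ===== VERDICT (by name: the statement is the Claim_ definition above) =====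
theorem get_large_enough_prime_spec : Claim_equal_get_large_enough_prime := by
  intro batch _
  unfold Spec_get_large_enough_prime get_large_enough_prime get_large_enough_prime_alt
  match batch with
  | [] => rfl
  | x :: xs => exact goA_cons_eq_goB x xs standardPrimes
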